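-- pv_equiv track=rewrite | github.com/OliviaTshibumbu/collaboration-petinia-olivia | appli1.py | creer_resume_simple
-- ===== SOURCE A (Python) =====
-- def creer_resume_simple(texte):
--     # Découper le texte en phrases
--     phrases = []
--     phrase_actuelle = ""
--
--     for char in texte:
--         phrase_actuelle += char
--         if char in '.!?':
--             phrase_nettoyee = phrase_actuelle.strip()
--             if len(phrase_nettoyee) > 20:
--                 phrases.append(phrase_nettoyee)
--             phrase_actuelle = ""
--
--     if len(phrases) <= 3:
--         return texte[:200] + "..." if len(texte) > 200 else texte
--
--     # Prendre quelques phrases importantes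
--     phrases_importantes = []
--     phrases_importantes.append(phrases[0])  # Première phrase
--
--     if len(phrases) > 2:
--         phrases_importantes.append(phrases[len(phrases)//2])  # Phrase du milieu
--
--     phrases_importantes.append(phrases[-1])  # Dernière phrase
--
--     resume = ' '.join(phrases_importantes)
--
--     # Limiter le nombre de mots
--     mots = resume.split()
--     if len(mots) > 100:
--         resume = ' '.join(mots[:100]) + '...'
--
--     return resume
-- ===== SOURCE B (Python) =====
-- def decouper(texte):
--     # first terminated segment (delimiter kept), then recurse on the rest;
--     # an unterminated tail yields no segment
--     for i, c in enumerate(texte):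
--         if c in '.!?':
--             return [texte[:i+1]] + decouper(texte[i+1:])
--     return []
--
--
-- def creer_resume_simple(texte):
--     phrases = [p for p in (s.strip() for s in decouper(texte)) if len(p) > 20]
--
--     if len(phrases) <= 3:
--         return texte[:200] + "..." if len(texte) > 200 else texte
--
--     resume = ' '.join([phrases[0], phrases[len(phrases) // 2], phrases[-1]])
--
--     mots = resume.split()
--     if len(mots) > 100:
--         resume = ' '.join(mots[:100]) + '...'
--
--     return resume
-- ===== Notes on version B (the rewrite author's own statement) =====
-- stated objective: simpler
-- what changed: A's single pass that grows a character accumulator and flushes it at each terminator is replaced by a recursive splitter that cuts the text into whole terminator-ended segments first, then a comprehension strips and length-filters them; the summary assembly drops A's always-true len>2 guard.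
import Mathlib
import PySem

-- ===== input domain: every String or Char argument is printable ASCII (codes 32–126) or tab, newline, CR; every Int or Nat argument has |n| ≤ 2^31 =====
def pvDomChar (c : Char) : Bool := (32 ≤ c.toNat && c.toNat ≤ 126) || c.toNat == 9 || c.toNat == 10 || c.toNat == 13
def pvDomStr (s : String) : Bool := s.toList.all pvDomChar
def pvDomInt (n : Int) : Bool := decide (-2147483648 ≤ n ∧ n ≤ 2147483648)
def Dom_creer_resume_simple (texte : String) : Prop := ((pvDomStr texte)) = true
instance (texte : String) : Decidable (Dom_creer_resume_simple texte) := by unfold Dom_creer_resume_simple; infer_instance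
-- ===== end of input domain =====

-- B replaces A's char-by-char accumulator loop by a recursive splitter that cuts the text at
-- terminator positions into whole segments, then filters stripped segments by length (objective:
-- simpler decomposition; same return value everywhere, equivalence proved below).

-- ===== PORT A =====
def pvTerm (c : Char) : Bool := c == '.' || c == '!' || c == '?'

def creer_resume_simple (texte : String) : String :=
  let cs := texte.toList
  let st := cs.foldl (fun (s : List (List Char) × List Char) c =>
      let cur := s.2 ++ [c]
      if pvTerm c then
        let p := PySem.Chars.strip cur
        ((if 20 < p.length then s.1 ++ [p] else s.1), ([] : List Char))
      else (s.1, cur)) ([], [])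
  let phrases := st.1
  if phrases.length ≤ 3 then
    (if 200 < cs.length then String.ofList (PySem.List.slice cs none (some 200) ++ "...".toList) else texte)
  else
    let importantes := [phrases.getD 0 []]
      ++ (if 2 < phrases.length then [phrases.getD (phrases.length / 2) []] else [])
      ++ [PySem.List.pyGetD phrases (-1) []]
    let resume := PySem.Chars.join [' '] importantes
    let mots := PySem.Chars.split₀ resume
    if 100 < mots.length then String.ofList (PySem.Chars.join [' '] (mots.take 100) ++ "...".toList)
    else String.ofList resume

-- ===== PORT B =====
-- Source B's `decouper`: the enumerate-scan for the first terminator is ported as List.findIdx?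
-- (exactly the first index whose char satisfies the test), then slice/recurse.
def decouper (cs : List Char) : List (List Char) :=
  match h : cs.findIdx? pvTerm with
  | some i => cs.take (i + 1) :: decouper (cs.drop (i + 1))
  | none => []
termination_by cs.length
decreasing_by
  simp only [List.length_drop]
  have hne : cs ≠ [] := by
    intro hnil; rw [hnil] at h; simp at h
  have : 0 < cs.length := List.length_pos_iff.mpr hne
  omega

def creer_resume_simple_alt (texte : String) : String :=
  let cs := texte.toList
  let phrases := ((decouper cs).map PySem.Chars.strip).filter (fun p => 20 < p.length)
  if phrases.length ≤ 3 then
    (if 200 < cs.length then String.ofList (PySem.List.slice cs none (some 200) ++ "...".toList) else texte)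
  else
    let resume := PySem.Chars.join [' ']
      [phrases.getD 0 [], phrases.getD (phrases.length / 2) [], PySem.List.pyGetD phrases (-1) []]
    let mots := PySem.Chars.split₀ resume
    if 100 < mots.length then String.ofList (PySem.Chars.join [' '] (mots.take 100) ++ "...".toList)
    else String.ofList resume

-- ===== PRECONDITION & SPEC =====
def Spec_creer_resume_simple (texte : String) (out : String) : Prop := out = creer_resume_simple_alt texte
instance (texte : String) (out : String) : Decidable (Spec_creer_resume_simple texte out) := by unfold Spec_creer_resume_simple; infer_instance

-- ===== CLAIM (what is proved, stated in full; the proofs are below) =====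
def Claim_equal_creer_resume_simple : Prop := ∀ (texte : String), Dom_creer_resume_simple texte → Spec_creer_resume_simple texte (creer_resume_simple texte)

-- ===== LEMMAS AND PROOFS =====

-- decouper on a terminator-free prefix followed by a terminator cuts exactly after it
lemma decouper_cut (cur rest : List Char) (c : Char)
    (hcur : ∀ x ∈ cur, pvTerm x = false) (hc : pvTerm c = true) :
    decouper (cur ++ c :: rest) = (cur ++ [c]) :: decouper rest := by
  have hidx : (cur ++ c :: rest).findIdx? pvTerm = some cur.length := by
    rw [List.findIdx?_append, List.findIdx?_eq_none_iff.mpr hcur, List.findIdx?_cons, hc]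
    simp
  rw [decouper]
  split
  · rename_i i heq
    rw [hidx] at heq
    obtain rfl : i = cur.length := (Option.some.inj heq).symm
    have h1 : cur ++ c :: rest = (cur ++ [c]) ++ rest := by simp
    have h2 : cur.length + 1 = (cur ++ [c]).length := by simp
    rw [h1, h2, List.take_left, List.drop_left]
  · rename_i heq
    rw [hidx] at heq
    exact absurd heq (by simp)

lemma decouper_no_term (cur : List Char) (hcur : ∀ x ∈ cur, pvTerm x = false) :
    decouper cur = [] := by
  rw [decouper]
  split
  · rename_i i heq
    rw [List.findIdx?_eq_none_iff.mpr hcur] at heq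
    exact absurd heq (by simp)
  · rfl

-- A's accumulator loop equals B's segment pipeline, generalized over leftover state
lemma foldA_eq (cs : List Char) : ∀ (ph : List (List Char)) (cur : List Char),
    (∀ x ∈ cur, pvTerm x = false) →
    (cs.foldl (fun (s : List (List Char) × List Char) c =>
      let cur := s.2 ++ [c]
      if pvTerm c then
        let p := PySem.Chars.strip cur
        ((if 20 < p.length then s.1 ++ [p] else s.1), ([] : List Char))
      else (s.1, cur)) (ph, cur)).1
    = ph ++ ((decouper (cur ++ cs)).map PySem.Chars.strip).filter (fun p => 20 < p.length) := by
  induction cs with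
  | nil =>
    intro ph cur hcur
    rw [List.foldl_nil, List.append_nil, decouper_no_term cur hcur]
    simp
  | cons c rest ih =>
    intro ph cur hcur
    by_cases hc : pvTerm c = true
    · simp only [List.foldl_cons, hc, if_true]
      rw [ih _ [] (by simp), decouper_cut cur rest c hcur hc]
      simp only [List.map_cons, List.filter_cons, List.nil_append]
      by_cases h : 20 < (PySem.Chars.strip (cur ++ [c])).length <;> simp [h]
    · simp only [List.foldl_cons, hc]
      have : cur ++ c :: rest = (cur ++ [c]) ++ rest := by simp
      rw [this] at *
      exact ih ph (cur ++ [c]) (by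
        intro x hx
        rcases List.mem_append.mp hx with h | h
        · exact hcur x h
        · simp at h; subst h; simpa using hc)

-- ===== VERDICT (by name: the statement is the Claim_ definition above) =====
theorem creer_resume_simple_spec : Claim_equal_creer_resume_simple := by
  intro texte _
  unfold Spec_creer_resume_simple creer_resume_simple creer_resume_simple_alt
  simp only [foldA_eq texte.toList [] [] (by simp), List.nil_append]
  set phrases := ((decouper texte.toList).map PySem.Chars.strip).filter (fun p => 20 < p.length) with hph
  by_cases h3 : phrases.length ≤ 3
  · simp [h3]
  · have h2 : 2 < phrases.length := by omega
    simp only [h3, if_false, h2, if_true]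
    rfl
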